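-- pv_equiv track=rewrite | github.com/Havocprime/Parseideon | Parseidon3.5py.py | fix_score
-- ===== SOURCE A (Python) =====
-- from collections import Counter, defaultdict
--
-- def consensus_value(candidates, numeric=False):
--     # Remove empty and clearly broken entries
--     candidates = [c for c in candidates if c not in ("", None)]
--     if not candidates:
--         return ""
--     if numeric:
--         # Keep only numbers
--         candidates = [c for c in candidates if str(c).replace('.', '', 1).isdigit()]
--     if not candidates:
--         return ""
--     count = Counter(candidates)
--     most_common, freq = count.most_common(1)[0]
--     # For numeric, don't allow singletons unless that's all we've got
--     if numeric and freq == 1 and len(candidates) > 1: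
--         # Take median or mean, or just leave blank if crazy
--         nums = [int(c) for c in candidates if c.isdigit()]
--         if nums:
--             nums.sort()
--             return str(nums[len(nums)//2])  # median
--         else:
--             return ""
--     return most_common
--
-- def fix_score(candidates):
--     # Try to pick a reasonable score (usually 4-digit)
--     candidates = [str(c) for c in candidates if c and c != "0"]
--     digit_candidates = [c for c in candidates if c.isdigit()]
--     likely_scores = [c for c in digit_candidates if len(c) >= 3]
--     if likely_scores:
--         # Pick the most common
--         return consensus_value(likely_scores, numeric=True)
--     if digit_candidates:
--         return consensus_value(digit_candidates, numeric=True)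
--     return ""
-- ===== SOURCE B (Python) =====
-- def fix_score(candidates):
--     # Sort-and-scan consensus: one sort of (index, value) pairs by the key
--     # (int(value), value, index); the mode is the longest run of equal strings
--     # (ties go to the run whose first index is smallest, i.e. Counter's
--     # first-inserted tie-break) and the median is read off the same sorted list.
--     pool = [str(c) for c in candidates if c and c != "0" and str(c).isdigit()]
--     big = [s for s in pool if len(s) >= 3]
--     chosen = big if big else pool
--     n = len(chosen)
--     if n == 0:
--         return ""
--     ordered = sorted(enumerate(chosen), key=lambda p: (int(p[1]), p[1], p[0]))
--     best_val, best_len, best_first = "", 0, -1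
--     i = 0
--     while i < n:
--         j = i + 1
--         while j < n and ordered[j][1] == ordered[i][1]:
--             j += 1
--         run = j - i
--         if run > best_len or (run == best_len and ordered[i][0] < best_first):
--             best_val, best_len, best_first = ordered[i][1], run, ordered[i][0]
--         i = j
--     if best_len == 1 and n > 1:
--         return str(int(ordered[n // 2][1]))
--     return best_val
-- ===== Notes on version B (the rewrite author's own statement) =====
-- stated objective: alternative
-- what changed: Replaced Counter-based mode selection by a single sort of (index, value) pairs keyed by (int(value), value, index) followed by a run-length scan: the longest run of equal strings gives the mode (run ties resolved by smallest first index, reproducing Counter's first-inserted tie-break) and the median is read directly off the same sorted list instead of re-sorting the integers.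
import Mathlib
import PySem

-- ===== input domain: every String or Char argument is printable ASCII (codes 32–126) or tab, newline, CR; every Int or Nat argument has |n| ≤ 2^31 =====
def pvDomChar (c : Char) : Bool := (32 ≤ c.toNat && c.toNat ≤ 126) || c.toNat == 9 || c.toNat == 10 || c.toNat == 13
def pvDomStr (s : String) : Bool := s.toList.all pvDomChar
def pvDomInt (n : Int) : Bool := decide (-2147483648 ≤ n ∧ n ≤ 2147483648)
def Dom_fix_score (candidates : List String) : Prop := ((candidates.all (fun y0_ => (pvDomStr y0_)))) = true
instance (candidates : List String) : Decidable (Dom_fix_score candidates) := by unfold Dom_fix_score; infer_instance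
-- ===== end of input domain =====

-- B replaces the Counter-based mode of A by one sort of (index, value) pairs keyed by
-- (int(value), value, index) followed by a run-length scan (objective: alternative algorithm).

-- ===== PORT A =====
-- helper for Python's c.replace('.', '', 1) ; exact for old='.', new='', count=1:
-- it removes the first '.' of the character list and keeps everything else.
def pvReplaceDot1 : List Char → List Char
  | [] => []
  | c :: rest => if c = '.' then rest else c :: pvReplaceDot1 rest

def consensus_value (candidates : List String) (numeric : Bool) : String :=
  let c1 := candidates.filter (fun c => !(c == ""))
  if c1 = [] then ""
  else
    let c2 := if numeric then c1.filter (fun c => PySem.Chars.strIsdigit (pvReplaceDot1 c.toList)) else c1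
    if c2 = [] then ""
    else
      let count := PySem.Dict.counter c2
      -- most_common(1)[0]: CPython's nlargest(1, …) is max(…), the FIRST item of maximal count
      let mc := PySem.List.maxD count.items (fun p => p.2) ("", 0)
      if numeric && (mc.2 == 1) && decide (1 < c2.length) then
        let nums := (c2.filter (fun c => PySem.Str.strIsdigit c)).map
          (fun c => (PySem.Int.ofStr? c).getD 0)   -- int(c): never none here, c.isdigit() held
        let nums2 := PySem.List.sorted nums (fun x => x) false
        if nums2 ≠ [] then
          PySem.Int.toStr (PySem.List.pyGetD nums2 (PySem.Int.floordiv (nums2.length : Int) 2) 0)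
        else ""
      else mc.1

def fix_score (candidates : List String) : String :=
  let cands := (candidates.filter (fun c => !(c == "") && !(c == "0"))).map (fun c => c)
  let digit_candidates := cands.filter (fun c => PySem.Str.strIsdigit c)
  let likely_scores := digit_candidates.filter (fun c => decide (3 ≤ PySem.Str.len c))
  if likely_scores ≠ [] then consensus_value likely_scores true
  else if digit_candidates ≠ [] then consensus_value digit_candidates true
  else ""

-- ===== PORT B =====
-- the sort key lambda p: (int(p[1]), p[1], p[0]) — Python tuple comparison is this lexicographic order
def fsB_key (p : Int × String) : Lex (Int × Lex (String × Int)) :=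
  toLex ((PySem.Int.ofStr? p.2).getD 0, toLex (p.2, p.1))   -- int(p[1]): never none, p[1].isdigit() held

-- the two nested while loops of Source B: consume one run of equal strings, update the best triple
def fsB_scan : List (Int × String) → String × Int × Int → String × Int × Int
  | [], best => best
  | (i, s) :: rest, (bv, bl, bf) =>
    let run : Int := ((rest.takeWhile (fun p => p.2 == s)).length : Int) + 1
    let rest' := rest.dropWhile (fun p => p.2 == s)
    fsB_scan rest' (if bl < run || (run == bl && i < bf) then (s, run, i) else (bv, bl, bf))
termination_by l _ => l.length
decreasing_by
  exact Nat.lt_succ_of_le (List.length_dropWhile_le _ _)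

def fix_score_alt (candidates : List String) : String :=
  let pool := (candidates.filter (fun c => !(c == "") && !(c == "0") && PySem.Str.strIsdigit c)).map (fun c => c)
  let big := pool.filter (fun s => decide (3 ≤ PySem.Str.len s))
  let chosen := if big ≠ [] then big else pool
  let n := chosen.length
  if n = 0 then ""
  else
    let ordered := PySem.List.sorted (PySem.List.enumerate chosen) fsB_key false
    let r := fsB_scan ordered ("", 0, -1)
    if r.2.1 == 1 && decide (1 < n) then
      PySem.Int.toStr ((PySem.Int.ofStr? (PySem.List.pyGetD ordered (PySem.Int.floordiv (n : Int) 2) (0, "")).2).getD 0)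
    else r.1

-- ===== PRECONDITION & SPEC =====
def Spec_fix_score (candidates : List String) (out : String) : Prop := out = fix_score_alt candidates
instance (candidates : List String) (out : String) : Decidable (Spec_fix_score candidates out) := by unfold Spec_fix_score; infer_instance

-- ===== CLAIM (what is proved, stated in full; the proofs are below) =====
def Claim_equal_fix_score : Prop := ∀ (candidates : List String), Dom_fix_score candidates → Spec_fix_score candidates (fix_score candidates)

-- ===== LEMMAS AND PROOFS =====

-- count of v in l, as Int
def pvCnt (l : List String) (v : String) : Int := (l.count v : Int)
-- index of the first occurrence of v in l, as Int
def pvFidx (l : List String) (v : String) : Int := (l.idxOf v : Int)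
-- selection key: maximal count wins, ties go to the smallest first-occurrence index
def pvPsi (l : List String) (v : String) : Lex (Int × Int) := toLex (pvCnt l v, -(pvFidx l v))
-- the (int(v), v) part of the sort key, on plain values
def pvKV (v : String) : Lex (Int × String) := toLex ((PySem.Int.ofStr? v).getD 0, v)
-- the occurrences of value v in enumerate l, in index order
def pvOcc (l : List String) (v : String) : List (Int × String) :=
  (PySem.List.enumerate l).filter (fun p => p.2 == v)
-- the distinct values of l, sorted by (int(v), v)
def pvV (l : List String) : List String := PySem.List.sorted (PySem.Set.ofList l) pvKV false
-- what A's maxD fold computes over the counter keys (keep-first max by count)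
def pvBestA (l : List String) : String → List String → String
  | m, [] => m
  | m, u :: X => if pvCnt l m < pvCnt l u then pvBestA l u X else pvBestA l m X
-- what B's run scan computes over the distinct values (explicit tie-break by first index)
def pvBestB (l : List String) : String → List String → String
  | b, [] => b
  | b, u :: X =>
    if pvCnt l b < pvCnt l u ∨ (pvCnt l u = pvCnt l b ∧ pvFidx l u < pvFidx l b)
    then pvBestB l u X else pvBestB l b X

def pvIsBest (l : List String) (S : List String) (b : String) : Prop :=
  b ∈ S ∧ ∀ u ∈ S, pvPsi l u ≤ pvPsi l b

lemma pvPsi_lt_iff (l : List String) (b u : String) :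
    pvPsi l b < pvPsi l u ↔
      pvCnt l b < pvCnt l u ∨ (pvCnt l u = pvCnt l b ∧ pvFidx l u < pvFidx l b) := by
  simp only [pvPsi, Prod.Lex.toLex_lt_toLex]
  omega

lemma pvBestB_isBest (l : List String) : ∀ (X : List String) (b : String),
    pvIsBest l (b :: X) (pvBestB l b X) := by
  intro X
  induction X with
  | nil =>
    intro b
    exact ⟨List.mem_cons_self, by intro u hu; simp at hu; subst hu; exact le_refl _⟩
  | cons u X' ih =>
    intro b
    show pvIsBest l (b :: u :: X') (pvBestB l b (u :: X'))
    unfold pvBestB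
    split_ifs with h
    · obtain ⟨hmem, hbd⟩ := ih u
      refine ⟨?_, ?_⟩
      · rcases List.mem_cons.mp hmem with h1 | h1
        · exact List.mem_cons.mpr (Or.inr (List.mem_cons.mpr (Or.inl h1)))
        · exact List.mem_cons.mpr (Or.inr (List.mem_cons.mpr (Or.inr h1)))
      · intro w hw
        rcases List.mem_cons.mp hw with h1 | h1
        · subst h1
          exact le_of_lt (lt_of_lt_of_le ((pvPsi_lt_iff l w u).mpr h) (hbd u List.mem_cons_self))
        · exact hbd w h1
    · obtain ⟨hmem, hbd⟩ := ih b
      refine ⟨?_, ?_⟩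
      · rcases List.mem_cons.mp hmem with h1 | h1
        · exact List.mem_cons.mpr (Or.inl h1)
        · exact List.mem_cons.mpr (Or.inr (List.mem_cons.mpr (Or.inr h1)))
      · intro w hw
        rcases List.mem_cons.mp hw with h1 | h1
        · subst h1; exact hbd w List.mem_cons_self
        · rcases List.mem_cons.mp h1 with h2 | h2
          · subst h2
            have : ¬ pvPsi l b < pvPsi l w := fun hc => h ((pvPsi_lt_iff l b w).mp hc)
            exact le_trans (not_lt.mp this) (hbd b List.mem_cons_self)
          · exact hbd w (List.mem_cons.mpr (Or.inr h2))

lemma pvBestA_isBest (l : List String) : ∀ (X : List String) (m : String),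
    (m :: X).Pairwise (fun u v => pvFidx l u < pvFidx l v) →
    pvIsBest l (m :: X) (pvBestA l m X) := by
  intro X
  induction X with
  | nil =>
    intro m _
    exact ⟨List.mem_cons_self, by intro u hu; simp at hu; subst hu; exact le_refl _⟩
  | cons u X' ih =>
    intro m hpw
    rw [List.pairwise_cons] at hpw
    obtain ⟨hm, hpw'⟩ := hpw
    rw [List.pairwise_cons] at hpw'
    obtain ⟨hu, hX'⟩ := hpw'
    show pvIsBest l (m :: u :: X') (pvBestA l m (u :: X'))
    unfold pvBestA
    split_ifs with h
    · have hpw2 : (u :: X').Pairwise (fun a b => pvFidx l a < pvFidx l b) :=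
        List.pairwise_cons.mpr ⟨hu, hX'⟩
      obtain ⟨hmem, hbd⟩ := ih u hpw2
      refine ⟨?_, ?_⟩
      · rcases List.mem_cons.mp hmem with h1 | h1
        · exact List.mem_cons.mpr (Or.inr (List.mem_cons.mpr (Or.inl h1)))
        · exact List.mem_cons.mpr (Or.inr (List.mem_cons.mpr (Or.inr h1)))
      · intro w hw
        rcases List.mem_cons.mp hw with h1 | h1
        · subst h1
          exact le_of_lt (lt_of_lt_of_le ((pvPsi_lt_iff l w u).mpr (Or.inl h))
            (hbd u List.mem_cons_self))
        · exact hbd w h1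
    · have hpw2 : (m :: X').Pairwise (fun a b => pvFidx l a < pvFidx l b) :=
        List.pairwise_cons.mpr ⟨fun v hv => hm v (List.mem_cons.mpr (Or.inr hv)), hX'⟩
      obtain ⟨hmem, hbd⟩ := ih m hpw2
      refine ⟨?_, ?_⟩
      · rcases List.mem_cons.mp hmem with h1 | h1
        · exact List.mem_cons.mpr (Or.inl h1)
        · exact List.mem_cons.mpr (Or.inr (List.mem_cons.mpr (Or.inr h1)))
      · intro w hw
        rcases List.mem_cons.mp hw with h1 | h1
        · subst h1; exact hbd w List.mem_cons_self
        · rcases List.mem_cons.mp h1 with h2 | h2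
          · subst h2
            have hle : pvPsi l w ≤ pvPsi l m := by
              refine le_of_lt ((pvPsi_lt_iff l w m).mpr ?_)
              rcases lt_or_eq_of_le (not_lt.mp h) with h3 | h3
              · exact Or.inl h3
              · exact Or.inr ⟨h3.symm, hm w List.mem_cons_self⟩
            exact le_trans hle (hbd m List.mem_cons_self)
          · exact hbd w (List.mem_cons.mpr (Or.inr h2))

lemma pvPsi_inj (l : List String) {u v : String} (hu : u ∈ l) (hv : v ∈ l)
    (h : pvPsi l u = pvPsi l v) : u = v := by
  have hf : pvFidx l u = pvFidx l v := by
    have := congrArg (fun x : Lex (Int × Int) => (ofLex x).2) h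
    simp only [pvPsi] at this
    simpa [pvFidx] using this
  have hidx : l.idxOf u = l.idxOf v := by
    simpa [pvFidx] using hf
  have h1 : l.idxOf u < l.length := List.idxOf_lt_length_of_mem hu
  have h2 : l.idxOf v < l.length := List.idxOf_lt_length_of_mem hv
  have := List.getElem_idxOf h1
  have h4 := List.getElem_idxOf h2
  rw [← this, ← h4]
  simp [hidx]

lemma pvIsBest_unique (l : List String) {S : List String} {b1 b2 : String}
    (hS : ∀ u ∈ S, u ∈ l) (h1 : pvIsBest l S b1) (h2 : pvIsBest l S b2) : b1 = b2 := by
  exact pvPsi_inj l (hS _ h1.1) (hS _ h2.1)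
    (le_antisymm (h2.2 _ h1.1) (h1.2 _ h2.1))

lemma pvPairwise_idxOf_ofList (l : List String) :
    (PySem.Set.ofList l).Pairwise (fun u v => pvFidx l u < pvFidx l v) := by
  induction l with
  | nil => simp [PySem.Set.ofList_nil]
  | cons x t ih =>
    rw [PySem.Set.ofList_cons, List.pairwise_cons]
    constructor
    · intro v hv
      obtain ⟨hvmem, hvne⟩ := (PySem.Set.mem_discard _ x v).mp hv
      have : (x :: t).idxOf v = (t.idxOf v) + 1 := List.idxOf_cons_ne t (fun h => hvne h.symm)
      simp only [pvFidx, List.idxOf_cons_self, this]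
      omega
    · have hsub : (PySem.Set.ofList t).discard x = (PySem.Set.ofList t).filter (fun y => !y == x) := rfl
      rw [hsub]
      refine List.Pairwise.imp_of_mem ?_ (List.Pairwise.filter _ ih)
      intro a b ha hb hab
      have hane : a ≠ x := by
        have := List.of_mem_filter ha; simpa using this
      have hbne : b ≠ x := by
        have := List.of_mem_filter hb; simpa using this
      have h1 : (x :: t).idxOf a = (t.idxOf a) + 1 := List.idxOf_cons_ne t (fun h => hane h.symm)
      have h2 : (x :: t).idxOf b = (t.idxOf b) + 1 := List.idxOf_cons_ne t (fun h => hbne h.symm)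
      simp only [pvFidx] at hab ⊢
      rw [h1, h2]
      omega

lemma pvOcc_snd (l : List String) (v : String) : ∀ p ∈ pvOcc l v, p.2 = v := by
  intro p hp
  have := List.of_mem_filter hp
  simpa using this

lemma pvOcc_length_aux (v : String) : ∀ (l : List String) (s : Int),
    ((PySem.List.enumerate l s).filter (fun p => p.2 == v)).length = l.count v := by
  intro l
  induction l with
  | nil => intro s; simp [PySem.List.enumerate]
  | cons x t ih =>
    intro s
    rw [PySem.List.enumerate_cons, List.filter_cons, List.count_cons]
    by_cases hx : x = v
    · subst hx; simp [ih (s + 1)]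
    · simp [hx, ih (s + 1)]

lemma pvOcc_head_aux (v : String) : ∀ (l : List String) (s : Int), v ∈ l →
    ((PySem.List.enumerate l s).filter (fun p => p.2 == v)).head? =
      some (s + (l.idxOf v : Int), v) := by
  intro l
  induction l with
  | nil => intro s h; simp at h
  | cons x t ih =>
    intro s hv
    rw [PySem.List.enumerate_cons, List.filter_cons]
    by_cases hx : x = v
    · subst hx; simp [List.idxOf_cons_self]
    · have hvt : v ∈ t := by
        rcases List.mem_cons.mp hv with h | h
        · exact absurd h.symm hx
        · exact h
      have hidx : (x :: t).idxOf v = (t.idxOf v) + 1 := List.idxOf_cons_ne t hx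
      rw [if_neg (by simp [hx]), ih (s + 1) hvt, hidx]
      simp only [Option.some.injEq, Prod.mk.injEq, and_true]
      push_cast
      ring

lemma pvPerm_flatMap : ∀ (V : List String) (ys : List (Int × String)), V.Nodup →
    (∀ p ∈ ys, p.2 ∈ V) →
    (V.flatMap (fun v => ys.filter (fun p => p.2 == v))).Perm ys := by
  intro V
  induction V with
  | nil =>
    intro ys _ hmem
    cases ys with
    | nil => simp
    | cons p t => exact absurd (hmem p List.mem_cons_self) (by simp)
  | cons v V' ih =>
    intro ys hnd hmem
    rw [List.flatMap_cons]
    have hnd' : V'.Nodup := (List.nodup_cons.mp hnd).2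
    have hvnot : v ∉ V' := (List.nodup_cons.mp hnd).1
    -- the tail runs only see the elements whose value is not v
    have hcongr : ∀ u ∈ V',
        ys.filter (fun p => p.2 == u) =
        (ys.filter (fun p => !(p.2 == v))).filter (fun p => p.2 == u) := by
      intro u hu
      rw [List.filter_filter]
      refine List.filter_congr ?_
      intro p _
      by_cases hp : p.2 = u
      · have huv : u ≠ v := fun h => hvnot (h ▸ hu)
        simp [hp, huv]
      · simp [hp]
    have hflat : V'.flatMap (fun u => ys.filter (fun p => p.2 == u)) =
        V'.flatMap (fun u => (ys.filter (fun p => !(p.2 == v))).filter (fun p => p.2 == u)) := by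
      apply List.flatMap_congr  -- may not exist; fallback below
      intro u hu
      exact hcongr u hu
    rw [hflat]
    have hperm' : (V'.flatMap (fun u =>
        (ys.filter (fun p => !(p.2 == v))).filter (fun p => p.2 == u))).Perm
        (ys.filter (fun p => !(p.2 == v))) := by
      refine ih _ hnd' ?_
      intro p hp
      have hmem' : p.2 ∈ v :: V' := hmem p (List.mem_filter.mp hp).1
      have hne : ¬(p.2 == v) = true := by
        have := (List.mem_filter.mp hp).2; simpa using this
      rcases List.mem_cons.mp hmem' with h | h
      · exact absurd (by simpa using h) (by simpa using hne)
      · exact h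
    exact List.Perm.trans (List.Perm.append_left _ hperm') (List.filter_append_perm _ ys)

lemma pvFlat_pairwise (l : List String) : ∀ (V : List String),
    V.Pairwise (fun u v => pvKV u < pvKV v) →
    (V.flatMap (fun v => pvOcc l v)).Pairwise (fun p q => fsB_key p < fsB_key q) := by
  intro V
  induction V with
  | nil => intro _; simp
  | cons v V' ih =>
    intro hpw
    rw [List.pairwise_cons] at hpw
    obtain ⟨hv, hpw'⟩ := hpw
    rw [List.flatMap_cons, List.pairwise_append]
    refine ⟨?_, ih hpw', ?_⟩
    · -- within one run: equal value, indices strictly increasing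
      have hfst : (pvOcc l v).Pairwise (fun p q => p.1 < q.1) :=
        List.Pairwise.filter _ (PySem.List.pairwise_lt_enumerate l 0)
      refine List.Pairwise.imp_of_mem ?_ hfst
      intro p q hp hq hlt
      have hp2 := pvOcc_snd l v p hp
      have hq2 := pvOcc_snd l v q hq
      simp only [fsB_key, Prod.Lex.toLex_lt_toLex]
      exact Or.inr ⟨by rw [hp2, hq2], Or.inr ⟨by rw [hp2, hq2], hlt⟩⟩
    · -- across runs: the (int v, v) part strictly increases
      intro p hp q hq
      obtain ⟨u, hu, hqu⟩ := List.mem_flatMap.mp hq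
      have hp2 := pvOcc_snd l v p hp
      have hq2 := pvOcc_snd l u q hqu
      have hkv : pvKV v < pvKV u := hv u hu
      simp only [pvKV, Prod.Lex.toLex_lt_toLex] at hkv
      simp only [fsB_key, Prod.Lex.toLex_lt_toLex]
      rcases hkv with h | ⟨h1, h2⟩
      · left; rw [hp2, hq2]; exact h
      · exact Or.inr ⟨by rw [hp2, hq2]; exact h1, Or.inl (by rw [hp2, hq2]; exact h2)⟩

lemma pvKV_inj {u v : String} (h : pvKV u = pvKV v) : u = v := by
  have := congrArg (fun x : Lex (Int × String) => (ofLex x).2) h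
  simpa [pvKV] using this

lemma pvV_pairwise (l : List String) : (pvV l).Pairwise (fun u v => pvKV u < pvKV v) := by
  have h1 : (pvV l).Pairwise (fun u v => pvKV u ≤ pvKV v) :=
    PySem.List.sorted_pairwise _ _
  have h2 : (pvV l).Nodup :=
    ((PySem.List.sorted_perm (PySem.Set.ofList l) pvKV false).nodup_iff).mpr
      (PySem.Set.nodup_ofList l)
  refine List.Pairwise.imp ?_ (h1.and h2)
  intro a b ⟨hle, hne⟩
  exact lt_of_le_of_ne hle (fun h => hne (pvKV_inj h))

lemma pvOrdered_eq (l : List String) :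
    PySem.List.sorted (PySem.List.enumerate l) fsB_key false =
      (pvV l).flatMap (fun v => pvOcc l v) := by
  refine PySem.List.sorted_eq_of_perm_of_pairwise_lt _ _ _ ?_ (pvFlat_pairwise l _ (pvV_pairwise l))
  refine pvPerm_flatMap (pvV l) _ ?_ ?_
  · exact ((PySem.List.sorted_perm (PySem.Set.ofList l) pvKV false).nodup_iff).mpr
      (PySem.Set.nodup_ofList l)
  · intro p hp
    rw [pvV, PySem.List.mem_sorted, PySem.Set.mem_ofList]
    obtain ⟨k, hk, hpk⟩ := (PySem.List.mem_enumerate_iff l 0 p).mp hp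
    rw [hpk]
    exact List.getElem_mem hk

lemma pvScan_step (l : List String) (v : String) (V' : List String) (hv : v ∈ l)
    (hnv : v ∉ V') (_hV' : ∀ u ∈ V', u ∈ l) (acc : String × Int × Int) :
    fsB_scan ((v :: V').flatMap (fun u => pvOcc l u)) acc =
      fsB_scan (V'.flatMap (fun u => pvOcc l u))
        (if acc.2.1 < pvCnt l v ∨ (pvCnt l v = acc.2.1 ∧ pvFidx l v < acc.2.2)
         then (v, pvCnt l v, pvFidx l v) else acc) := by
  obtain ⟨bv, bl, bf⟩ := acc
  have hhead : (pvOcc l v).head? = some (pvFidx l v, v) := by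
    have h := pvOcc_head_aux v l 0 hv
    simpa [pvOcc, pvFidx] using h
  obtain ⟨t, hqt⟩ : ∃ t, pvOcc l v = (pvFidx l v, v) :: t := by
    cases h : pvOcc l v with
    | nil => rw [h] at hhead; simp at hhead
    | cons q t =>
      rw [h] at hhead
      simp only [List.head?_cons, Option.some.injEq] at hhead
      exact ⟨t, by rw [hhead]⟩
  have htall : ∀ p ∈ t, (p.2 == v) = true := by
    intro p hp
    have : p ∈ pvOcc l v := by rw [hqt]; exact List.mem_cons.mpr (Or.inr hp)
    simp [pvOcc_snd l v p this]
  have hrest : ∀ p ∈ V'.flatMap (fun u => pvOcc l u), (p.2 == v) = false := by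
    intro p hp
    obtain ⟨u, hu, hpu⟩ := List.mem_flatMap.mp hp
    have h2 : p.2 = u := pvOcc_snd l u p hpu
    have : p.2 ≠ v := by rw [h2]; intro h3; exact hnv (h3 ▸ hu)
    simpa using this
  rw [List.flatMap_cons, hqt, List.cons_append, fsB_scan]
  have htake : (t ++ V'.flatMap (fun u => pvOcc l u)).takeWhile (fun p => p.2 == v) = t := by
    rw [List.takeWhile_append, if_pos]
    · cases hfm : V'.flatMap (fun u => pvOcc l u) with
      | nil => simp
      | cons r rs =>
        have hr := hrest r (by rw [hfm]; exact List.mem_cons_self)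
        rw [List.takeWhile_cons, if_neg (by simp [hr]), List.append_nil]
    · rw [List.takeWhile_eq_self_iff.mpr htall]
  have hdrop : (t ++ V'.flatMap (fun u => pvOcc l u)).dropWhile (fun p => p.2 == v) =
      V'.flatMap (fun u => pvOcc l u) := by
    rw [List.dropWhile_append, if_pos]
    · cases hfm : V'.flatMap (fun u => pvOcc l u) with
      | nil => rfl
      | cons r rs =>
        rw [List.dropWhile_cons, if_neg]
        have := hrest r (by rw [hfm]; exact List.mem_cons_self)
        simp [this]
    · simp [List.dropWhile_eq_nil_iff.mpr htall]
  rw [htake, hdrop]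
  have hlen : ((t.length : Int) + 1) = pvCnt l v := by
    have h1 : (pvOcc l v).length = l.count v := pvOcc_length_aux v l 0
    rw [hqt] at h1
    simp only [List.length_cons] at h1
    simp only [pvCnt, ← h1]
    push_cast
    ring
  rw [hlen]
  congr 1
  by_cases h : bl < pvCnt l v ∨ (pvCnt l v = bl ∧ pvFidx l v < bf)
  · rw [if_pos h, if_pos]
    rcases h with h | ⟨h1, h2⟩
    · simp [h]
    · simp [h1, h2]
  · rw [if_neg h, if_neg]
    have h1 : pvCnt l v ≤ bl := not_lt.mp (fun hc => h (Or.inl hc))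
    have h2 : pvCnt l v = bl → bf ≤ pvFidx l v :=
      fun he => not_lt.mp (fun hc => h (Or.inr ⟨he, hc⟩))
    simp only [Bool.or_eq_true, decide_eq_true_eq, Bool.and_eq_true, beq_iff_eq]
    rintro (hlt | ⟨he, hf⟩)
    · omega
    · have := h2 he; omega

lemma pvScan_runs (l : List String) : ∀ (V : List String) (b : String), V.Nodup →
    (∀ v ∈ V, v ∈ l) →
    fsB_scan (V.flatMap (fun u => pvOcc l u)) (b, pvCnt l b, pvFidx l b) =
      (pvBestB l b V, pvCnt l (pvBestB l b V), pvFidx l (pvBestB l b V)) := by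
  intro V
  induction V with
  | nil =>
    intro b _ _
    simp [fsB_scan, pvBestB]
  | cons v V' ih =>
    intro b hnd hmem
    rw [pvScan_step l v V' (hmem v List.mem_cons_self) (List.nodup_cons.mp hnd).1
        (fun u hu => hmem u (List.mem_cons.mpr (Or.inr hu)))]
    show fsB_scan _
      (if pvCnt l b < pvCnt l v ∨ (pvCnt l v = pvCnt l b ∧ pvFidx l v < pvFidx l b)
       then (v, pvCnt l v, pvFidx l v) else (b, pvCnt l b, pvFidx l b)) = _
    unfold pvBestB
    by_cases h : pvCnt l b < pvCnt l v ∨ (pvCnt l v = pvCnt l b ∧ pvFidx l v < pvFidx l b)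
    · rw [if_pos h, if_pos h]
      exact ih v (List.nodup_cons.mp hnd).2 (fun u hu => hmem u (List.mem_cons.mpr (Or.inr hu)))
    · rw [if_neg h, if_neg h]
      exact ih b (List.nodup_cons.mp hnd).2 (fun u hu => hmem u (List.mem_cons.mpr (Or.inr hu)))

lemma pvFoldA (l : List String) : ∀ (X : List String) (m : String),
    PySem.List.max? ((m :: X).map (fun k => (k, pvCnt l k))) (fun p => p.2) =
      some (pvBestA l m X, pvCnt l (pvBestA l m X)) := by
  have hstep : ∀ (a b : String) (Y : List String),
      PySem.List.max? ((a :: b :: Y).map (fun k => (k, pvCnt l k))) (fun p => p.2) =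
      PySem.List.max? (((if pvCnt l a < pvCnt l b then b else a) :: Y).map
        (fun k => (k, pvCnt l k))) (fun p => p.2) := by
    intro a b Y
    rw [PySem.List.max?.eq_1, PySem.List.max?.eq_1]
    simp only [List.map_cons, List.foldl_cons]
    congr 1
    by_cases h : pvCnt l a < pvCnt l b
    · simp [h]
    · simp [h]
  intro X
  induction X with
  | nil =>
    intro m
    rw [PySem.List.max?.eq_1]
    simp [pvBestA]
  | cons u X' ih =>
    intro m
    rw [hstep m u X']
    by_cases h : pvCnt l m < pvCnt l u
    · rw [if_pos h, ih u]
      simp only [pvBestA]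
      rw [if_pos h]
    · rw [if_neg h, ih m]
      simp only [pvBestA]
      rw [if_neg h]

lemma pvMedian_eq (l : List String) :
    PySem.List.sorted (l.map (fun c => (PySem.Int.ofStr? c).getD 0)) (fun x => x) false =
      (PySem.List.sorted (PySem.List.enumerate l) fsB_key false).map
        (fun p => (PySem.Int.ofStr? p.2).getD 0) := by
  refine PySem.List.sorted_id_eq_of_perm_of_pairwise _ _ ?_ ?_
  · refine List.Perm.trans (List.Perm.map _ (PySem.List.sorted_perm _ _ _)) ?_
    rw [show (fun p : Int × String => (PySem.Int.ofStr? p.2).getD 0) =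
        (fun c => (PySem.Int.ofStr? c).getD 0) ∘ (fun p : Int × String => p.2) from rfl,
      ← List.map_map, PySem.List.map_snd_enumerate]
  · have h1 : (PySem.List.sorted (PySem.List.enumerate l) fsB_key false).Pairwise
        (fun p q => fsB_key p ≤ fsB_key q) := PySem.List.sorted_pairwise _ _
    refine List.Pairwise.map _ ?_ h1
    intro p q hle
    simp only [fsB_key, Prod.Lex.toLex_le_toLex] at hle
    rcases hle with h | ⟨h1, _⟩
    · exact le_of_lt h
    · exact le_of_eq h1

lemma pvDigit_ne_empty {c : String} (h : PySem.Str.strIsdigit c = true) : (c == "") = false := by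
  rw [beq_eq_false_iff_ne]
  intro hc
  subst hc
  exact absurd h (by decide)

lemma pvDigit_all {c : String} (h : PySem.Str.strIsdigit c = true) :
    ∀ ch ∈ c.toList, PySem.Chars.isdigit ch = true := by
  rw [PySem.Str.strIsdigit_eq, PySem.Chars.strIsdigit, Bool.and_eq_true] at h
  intro ch hch
  have := h.2
  rw [List.all_eq_true] at this
  exact this ch hch

lemma pvReplaceDot1_id : ∀ (cs : List Char), (∀ ch ∈ cs, PySem.Chars.isdigit ch = true) →
    pvReplaceDot1 cs = cs
  | [], _ => rfl
  | c :: rest, h => by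
    have hc : c ≠ '.' := by
      intro hc
      rw [hc] at h
      exact absurd (h '.' List.mem_cons_self) (by decide)
    unfold pvReplaceDot1
    rw [if_neg hc, pvReplaceDot1_id rest (fun ch hch => h ch (List.mem_cons.mpr (Or.inr hch)))]

lemma pvCore (l : List String) (hne : l ≠ []) (hd : ∀ s ∈ l, PySem.Str.strIsdigit s = true) :
    consensus_value l true =
      (let ordered := PySem.List.sorted (PySem.List.enumerate l) fsB_key false
       let r := fsB_scan ordered ("", 0, -1)
       if r.2.1 == 1 && decide (1 < l.length) then
         PySem.Int.toStr ((PySem.Int.ofStr? (PySem.List.pyGetD ordered (PySem.Int.floordiv (l.length : Int) 2) (0, "")).2).getD 0)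
       else r.1) := by
  -- the filters inside consensus_value are no-ops on nonempty digit strings
  have hc1 : l.filter (fun c => !(c == "")) = l :=
    List.filter_eq_self.mpr (fun c hc => by rw [pvDigit_ne_empty (hd c hc)]; rfl)
  have hc2 : l.filter (fun c => PySem.Chars.strIsdigit (pvReplaceDot1 c.toList)) = l :=
    List.filter_eq_self.mpr (fun c hc => by
      rw [pvReplaceDot1_id c.toList (pvDigit_all (hd c hc))]
      have := hd c hc
      rwa [PySem.Str.strIsdigit_eq] at this)
  have hc3 : l.filter (fun c => PySem.Str.strIsdigit c) = l :=
    List.filter_eq_self.mpr (fun c hc => hd c hc)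
  -- the counter keys
  obtain ⟨k0, K', hK⟩ : ∃ k0 K', PySem.Set.ofList l = k0 :: K' := by
    cases hK : PySem.Set.ofList l with
    | nil =>
      obtain ⟨x, hx⟩ := List.exists_mem_of_ne_nil l hne
      have : x ∈ PySem.Set.ofList l := (PySem.Set.mem_ofList l x).mpr hx
      rw [hK] at this
      simp at this
    | cons k0 K' => exact ⟨k0, K', rfl⟩
  have hsubK : ∀ u ∈ k0 :: K', u ∈ l := fun u hu => by
    rw [← hK] at hu
    exact (PySem.Set.mem_ofList l u).mp hu
  -- A's most_common(1)[0]
  have hmc : PySem.List.maxD (PySem.Dict.counter l).items (fun p => p.2) ("", 0) =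
      (pvBestA l k0 K', pvCnt l (pvBestA l k0 K')) := by
    have h2 : PySem.List.max? (PySem.Dict.counter l).items (fun p => p.2) =
        some (pvBestA l k0 K', pvCnt l (pvBestA l k0 K')) := by
      rw [PySem.Dict.items_counter, hK]
      exact pvFoldA l K' k0
    rw [PySem.List.maxD, h2]
    rfl
  -- B's sorted distinct values
  obtain ⟨v0, V'', hV⟩ : ∃ v0 V'', pvV l = v0 :: V'' := by
    cases hV : pvV l with
    | nil =>
      rw [pvV, PySem.List.sorted_eq_nil_iff] at hV
      rw [hV] at hK
      simp at hK
    | cons v0 V'' => exact ⟨v0, V'', rfl⟩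
  have hVnd : (v0 :: V'').Nodup := by
    rw [← hV]
    exact ((PySem.List.sorted_perm (PySem.Set.ofList l) pvKV false).nodup_iff).mpr
      (PySem.Set.nodup_ofList l)
  have hsubV : ∀ u ∈ v0 :: V'', u ∈ l := fun u hu => by
    rw [← hV, pvV, PySem.List.mem_sorted, PySem.Set.mem_ofList] at hu
    exact hu
  -- B's scan result
  have hscan : fsB_scan ((pvV l).flatMap (fun u => pvOcc l u)) ("", 0, -1) =
      (pvBestB l v0 V'', pvCnt l (pvBestB l v0 V''), pvFidx l (pvBestB l v0 V'')) := by
    rw [hV]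
    rw [pvScan_step l v0 V'' (hsubV v0 List.mem_cons_self) (List.nodup_cons.mp hVnd).1
        (fun u hu => hsubV u (List.mem_cons.mpr (Or.inr hu))) ("", 0, -1)]
    rw [if_pos (Or.inl (by
      show (0 : Int) < pvCnt l v0
      have : 0 < l.count v0 := List.count_pos_iff.mpr (hsubV v0 List.mem_cons_self)
      simp only [pvCnt]
      omega))]
    exact pvScan_runs l V'' v0 (List.nodup_cons.mp hVnd).2
      (fun u hu => hsubV u (List.mem_cons.mpr (Or.inr hu)))
  -- the two selections agree
  have hAB : pvBestA l k0 K' = pvBestB l v0 V'' := by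
    have hbA : pvIsBest l (k0 :: K') (pvBestA l k0 K') :=
      pvBestA_isBest l K' k0 (hK ▸ pvPairwise_idxOf_ofList l)
    have hbB : pvIsBest l (v0 :: V'') (pvBestB l v0 V'') := pvBestB_isBest l V'' v0
    have hmemiff : ∀ u, u ∈ v0 :: V'' ↔ u ∈ k0 :: K' := fun u => by
      rw [← hV, ← hK, pvV, PySem.List.mem_sorted]
    have hbB' : pvIsBest l (k0 :: K') (pvBestB l v0 V'') :=
      ⟨(hmemiff _).mp hbB.1, fun u hu => hbB.2 u ((hmemiff u).mpr hu)⟩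
    exact pvIsBest_unique l hsubK hbA hbB'
  -- assemble
  simp only [consensus_value, hc1, hc2, if_true, if_neg hne, hmc, pvOrdered_eq l, hscan,
    Bool.true_and, ← hAB]
  by_cases hcond : ((pvCnt l (pvBestA l k0 K') == 1) && decide (1 < l.length)) = true
  · rw [if_pos hcond, if_pos hcond, hc3]
    -- median branch
    have hnums : PySem.List.sorted (l.map (fun c => (PySem.Int.ofStr? c).getD 0)) (fun x => x) false =
        ((pvV l).flatMap (fun v => pvOcc l v)).map (fun p => (PySem.Int.ofStr? p.2).getD 0) := by
      rw [← pvOrdered_eq l]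
      exact pvMedian_eq l
    have hlenFM : ((pvV l).flatMap (fun v => pvOcc l v)).length = l.length := by
      rw [← pvOrdered_eq l, PySem.List.length_sorted, PySem.List.length_enumerate]
    have hlen2 : (PySem.List.sorted (l.map (fun c => (PySem.Int.ofStr? c).getD 0)) (fun x => x) false).length = l.length := by
      rw [PySem.List.length_sorted, List.length_map]
    have hnne : PySem.List.sorted (l.map (fun c => (PySem.Int.ofStr? c).getD 0)) (fun x => x) false ≠ [] := by
      intro h
      rw [h] at hlen2
      exact hne (List.length_eq_zero_iff.mp hlen2.symm)
    rw [if_pos hnne, hlen2, hnums]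
    have hpos : 0 < l.length := List.length_pos_iff.mpr hne
    have hhalf : l.length / 2 < l.length := Nat.div_lt_self hpos (by omega)
    have hfd : PySem.Int.floordiv (l.length : Int) 2 = ((l.length / 2 : Nat) : Int) := by
      exact_mod_cast PySem.Int.floordiv_natCast l.length 2
    rw [hfd, PySem.List.pyGetD_natCast, PySem.List.pyGetD_natCast]
    rw [List.getD_eq_getElem _ _ (by rw [List.length_map, hlenFM]; exact hhalf),
      List.getD_eq_getElem _ _ (by rw [hlenFM]; exact hhalf)]
    rw [List.getElem_map]
  · rw [if_neg hcond, if_neg hcond]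

-- ===== VERDICT (by name: the statement is the Claim_ definition above) =====
theorem fix_score_spec : Claim_equal_fix_score := by
  intro candidates _
  unfold Spec_fix_score
  show fix_score candidates = fix_score_alt candidates
  have hpool : (candidates.filter (fun c => !(c == "") && !(c == "0"))).filter
        (fun c => PySem.Str.strIsdigit c) =
      candidates.filter (fun c => !(c == "") && !(c == "0") && PySem.Str.strIsdigit c) := by
    rw [List.filter_filter]
    exact List.filter_congr (fun c _ => Bool.and_comm _ _)
  have hdigP : ∀ c ∈ candidates.filter (fun c => !(c == "") && !(c == "0") && PySem.Str.strIsdigit c),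
      PySem.Str.strIsdigit c = true := by
    intro c hc
    have h2 := (List.mem_filter.mp hc).2
    simp only [Bool.and_eq_true] at h2
    exact h2.2
  simp only [fix_score, fix_score_alt, List.map_id', hpool]
  set P := candidates.filter (fun c => !(c == "") && !(c == "0") && PySem.Str.strIsdigit c) with hP
  by_cases hbig : P.filter (fun c => decide (3 ≤ PySem.Str.len c)) ≠ []
  · rw [if_pos hbig, if_pos hbig, if_neg (by
      intro h
      exact hbig (List.length_eq_zero_iff.mp h))]
    exact pvCore _ hbig (fun c hc => hdigP c (List.mem_filter.mp hc).1)
  · rw [if_neg hbig, if_neg hbig]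
    by_cases hp : P ≠ []
    · rw [if_pos hp, if_neg (by
        intro h
        exact hp (List.length_eq_zero_iff.mp h))]
      exact pvCore _ hp hdigP
    · rw [if_neg hp, if_pos (by
        rw [List.length_eq_zero_iff]
        exact not_not.mp hp)]
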